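-- pv_equiv track=rewrite | github.com/yprite/bitflow | python/src/bitflow_onchain/clients/postgres.py | issued_supply_sats_through_height
-- ===== SOURCE A (Python) =====
-- HALVING_INTERVAL = 210_000
--
-- INITIAL_SUBSIDY_SATS = 50 * 100_000_000
--
-- def issued_supply_sats_through_height(height: int | None) -> int:
--     if height is None or height < 0:
--         return 0
--
--     remaining_blocks = height + 1
--     subsidy_sats = INITIAL_SUBSIDY_SATS
--     total_sats = 0
--
--     while remaining_blocks > 0 and subsidy_sats > 0:
--         blocks_in_epoch = min(remaining_blocks, HALVING_INTERVAL)
--         total_sats += blocks_in_epoch * subsidy_sats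
--         remaining_blocks -= blocks_in_epoch
--         subsidy_sats //= 2
--
--     return total_sats
-- ===== SOURCE B (Python) =====
-- HALVING_INTERVAL = 210_000
--
-- INITIAL_SUBSIDY_SATS = 50 * 100_000_000
--
-- def issued_supply_sats_through_height(height):
--     # Closed form, no loop: sum_{i>=0} floor(S / 2**i) == 2*S - S.bit_count(),
--     # so the sum over the first `full` epochs is that telescoped difference.
--     if height is None or height < 0:
--         return 0
--     full, rem = divmod(height + 1, HALVING_INTERVAL)
--     sub_full = INITIAL_SUBSIDY_SATS >> full
--     total_full_epochs = (2 * INITIAL_SUBSIDY_SATS - INITIAL_SUBSIDY_SATS.bit_count()) \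
--                         - (2 * sub_full - sub_full.bit_count())
--     return HALVING_INTERVAL * total_full_epochs + rem * sub_full
-- ===== Notes on version B (the rewrite author's own statement) =====
-- stated objective: faster
-- what changed: B replaces A's per-epoch halving loop with a loop-free closed form: using sum_{i>=0} floor(S/2^i) = 2S - popcount(S), the full-epoch total telescopes to (2S - popcount(S)) - (2*(S>>full) - popcount(S>>full)), plus rem*(S>>full) for the partial epoch.
import Mathlib
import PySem

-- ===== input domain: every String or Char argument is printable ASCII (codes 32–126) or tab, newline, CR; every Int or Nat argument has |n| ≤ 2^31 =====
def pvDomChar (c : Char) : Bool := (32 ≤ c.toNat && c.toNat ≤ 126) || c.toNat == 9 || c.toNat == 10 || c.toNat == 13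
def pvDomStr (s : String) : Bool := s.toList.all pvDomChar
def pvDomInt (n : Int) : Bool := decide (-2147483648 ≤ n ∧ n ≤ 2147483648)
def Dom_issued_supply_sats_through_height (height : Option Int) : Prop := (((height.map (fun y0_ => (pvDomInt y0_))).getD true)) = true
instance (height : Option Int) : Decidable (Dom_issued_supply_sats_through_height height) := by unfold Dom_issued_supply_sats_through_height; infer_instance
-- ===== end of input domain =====

-- B replaces A's per-epoch halving loop with a loop-free closed form based on the
-- identity sum_{i>=0} floor(S/2^i) = 2S - popcount(S); same results, no loop.


-- ===== PORT A =====
-- A's while loop: state (remaining_blocks, subsidy_sats, total_sats); terminates because subsidy halves.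
def pvLoopA (remaining subsidy total : Int) : Int :=
  if remaining > 0 ∧ subsidy > 0 then
    let blocks := min remaining 210000
    pvLoopA (remaining - blocks) (PySem.Int.floordiv subsidy 2) (total + blocks * subsidy)
  else total
termination_by subsidy.toNat
decreasing_by
  rename_i h
  have h2 : PySem.Int.floordiv subsidy 2 = subsidy / 2 := PySem.Int.floordiv_eq_ediv_of_pos (by omega)
  rw [h2]; omega

def issued_supply_sats_through_height (height : Option Int) : Int :=
  match height with
  | none => 0
  | some h => if h < 0 then 0 else pvLoopA (h + 1) 5000000000 0

-- ===== PORT B =====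
-- popcount, port of Python int.bit_count() (argument is always a nonnegative int here)
def pvPopcount (n : Nat) : Nat :=
  if n = 0 then 0 else n % 2 + pvPopcount (n / 2)
termination_by n
decreasing_by omega

def issued_supply_sats_through_height_alt (height : Option Int) : Int :=
  match height with
  | none => 0
  | some h =>
    if h < 0 then 0 else
    match PySem.Int.divmod? (h + 1) 210000 with
    | some (full, rem) =>
      -- INITIAL_SUBSIDY_SATS >> full (full ≥ 0 since h+1 ≥ 0 and the divisor is positive)
      let subFull : Nat := 5000000000 >>> full.toNat
      let totalFullEpochs : Int :=
        (2 * 5000000000 - (pvPopcount 5000000000 : Int))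
          - (2 * (subFull : Int) - (pvPopcount subFull : Int))
      210000 * totalFullEpochs + rem * (subFull : Int)
    | none => 0   -- unreachable: divisor 210000 ≠ 0

-- ===== PRECONDITION & SPEC =====
def Spec_issued_supply_sats_through_height (height : Option Int) (out : Int) : Prop := out = issued_supply_sats_through_height_alt height
instance (height : Option Int) (out : Int) : Decidable (Spec_issued_supply_sats_through_height height out) := by unfold Spec_issued_supply_sats_through_height; infer_instance

-- ===== CLAIM (what is proved, stated in full; the proofs are below) =====
def Claim_equal_issued_supply_sats_through_height : Prop := ∀ (height : Option Int), Dom_issued_supply_sats_through_height height → Spec_issued_supply_sats_through_height height (issued_supply_sats_through_height height)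

-- ===== LEMMAS AND PROOFS =====

-- G n = sum_{i>=0} floor(n/2^i) as the closed form 2n - popcount n
def pvG (n : Nat) : Int := 2 * (n : Int) - (pvPopcount n : Int)

theorem pvG_step (n : Nat) : pvG n = (n : Int) + pvG (n / 2) := by
  unfold pvG
  by_cases h : n = 0
  · simp [h, pvPopcount]
  · rw [pvPopcount, if_neg h]
    push_cast
    omega

-- A's loop with remaining = full*210000 + rem equals the telescoped closed form.
theorem pvLoopA_closed : ∀ (n : Nat) (full rem total : Int), 0 ≤ full → 0 ≤ rem → rem < 210000 →
    pvLoopA (full * 210000 + rem) (n : Int) total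
      = total + 210000 * (pvG n - pvG (n >>> full.toNat)) + rem * ((n >>> full.toNat : Nat) : Int) := by
  intro n
  induction n using Nat.strong_induction_on with
  | _ n ih =>
  intro full rem total hf hr hr2
  by_cases hn : n = 0
  · subst hn
    rw [pvLoopA, if_neg (by simp)]
    simp [pvG, pvPopcount, Nat.zero_shiftRight]
  · have hpos : (0:Int) < (n : Int) := by exact_mod_cast Nat.pos_of_ne_zero hn
    have hfd : PySem.Int.floordiv (n : Int) 2 = ((n / 2 : Nat) : Int) := by
      rw [PySem.Int.floordiv_eq_ediv_of_pos (by omega)]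
      omega
    by_cases hfull : full = 0
    · subst hfull
      simp only [Int.toNat_zero, Nat.shiftRight_zero, zero_mul, zero_add]
      by_cases hrem : rem > 0
      · rw [pvLoopA, if_pos ⟨hrem, hpos⟩]
        have hmin : min rem 210000 = rem := by omega
        simp only [hmin]
        rw [show rem - rem = 0 from by ring]
        rw [pvLoopA, if_neg (by omega)]
        ring
      · have h0 : rem = 0 := by omega
        subst h0
        rw [pvLoopA, if_neg (by omega)]
        ring
    · have h1le : (1:Int) ≤ full := by omega
      have hge : (210000:Int) ≤ full * 210000 := le_mul_of_one_le_left (by norm_num) h1le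
      rw [pvLoopA, if_pos ⟨by omega, hpos⟩]
      have hmin : min (full * 210000 + rem) 210000 = 210000 := by omega
      simp only [hmin]
      rw [show full * 210000 + rem - 210000 = (full - 1) * 210000 + rem from by ring, hfd]
      have hkey := ih (n / 2) (by omega) (full - 1) rem (total + 210000 * (n : Int)) (by omega) hr hr2
      rw [hkey]
      have hsh : n >>> full.toNat = (n / 2) >>> (full - 1).toNat := by
        have ht : full.toNat = (full - 1).toNat + 1 := by omega
        rw [ht, Nat.shiftRight_eq_div_pow, Nat.shiftRight_eq_div_pow,
            pow_succ', Nat.div_div_eq_div_mul]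
      rw [← hsh, pvG_step n]
      ring

-- ===== VERDICT (by name: the statement is the Claim_ definition above) =====
theorem issued_supply_sats_through_height_spec : Claim_equal_issued_supply_sats_through_height := by
  intro height _
  unfold Spec_issued_supply_sats_through_height
  match height with
  | none => rfl
  | some h =>
    unfold issued_supply_sats_through_height issued_supply_sats_through_height_alt
    by_cases hneg : h < 0
    · simp [hneg]
    · simp only [hneg, if_false]
      have hdm : PySem.Int.divmod? (h + 1) 210000 =
          some (PySem.Int.floordiv (h + 1) 210000, PySem.Int.mod (h + 1) 210000) := by
        simp [PySem.Int.divmod?, PySem.Int.floordiv, PySem.Int.mod]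
      simp only [hdm]
      have hfd : PySem.Int.floordiv (h + 1) 210000 = (h + 1) / 210000 :=
        PySem.Int.floordiv_eq_ediv_of_pos (by norm_num)
      have hmd : PySem.Int.mod (h + 1) 210000 = (h + 1) % 210000 :=
        PySem.Int.mod_eq_emod_of_pos (by norm_num)
      rw [hfd, hmd]
      have key := pvLoopA_closed 5000000000 ((h + 1) / 210000) ((h + 1) % 210000) 0
        (Int.ediv_nonneg (by omega) (by norm_num)) (Int.emod_nonneg _ (by norm_num)) (by omega)
      rw [show (h + 1) / 210000 * 210000 + (h + 1) % 210000 = h + 1 from by omega] at key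
      rw [show ((5000000000 : Nat) : Int) = (5000000000 : Int) from by norm_num] at key
      rw [key]
      unfold pvG
      push_cast
      ring
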